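-- pv_equiv track=rewrite | github.com/makeorbreakshop/machines-for-makers | crewai-price-extractor/app/agents/batch_optimizer.py | create_optimized_batch
-- ===== SOURCE A (Python) =====
-- from typing import List, Dict
-- import itertools
--
-- def group_machines_by_manufacturer(machines: List[Dict]) -> Dict[str, List[Dict]]:
--     """
--     Groups machines by manufacturer to optimize processing
--     """
--     grouped = {}
--
--     for machine in machines:
--         manufacturer = machine.get("Company", "Unknown")
--         if manufacturer not in grouped:
--             grouped[manufacturer] = []
--         grouped[manufacturer].append(machine)
--
--     return grouped
--
-- def create_optimized_batch(machines: List[Dict], batch_size: int = 5) -> List[List[Dict]]: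
--     """
--     Creates optimized batches of machines to process, grouped by manufacturer
--     """
--     # Group by manufacturer
--     grouped = group_machines_by_manufacturer(machines)
--
--     # Sort manufacturers by number of machines (descending)
--     sorted_manufacturers = sorted(
--         grouped.keys(),
--         key=lambda m: len(grouped[m]),
--         reverse=True
--     )
--
--     # Create batches based on manufacturer groups
--     batches = []
--     current_batch = []
--
--     # First, add one machine from each manufacturer to ensure diversity
--     for manufacturer in sorted_manufacturers:
--         if grouped[manufacturer]:
--             current_batch.append(grouped[manufacturer].pop(0))
--
--             if len(current_batch) >= batch_size:
--                 batches.append(current_batch)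
--                 current_batch = []
--
--     # If we have a partial batch, add it
--     if current_batch:
--         batches.append(current_batch)
--         current_batch = []
--
--     # Then distribute remaining machines
--     all_remaining = list(itertools.chain.from_iterable(
--         grouped[manufacturer] for manufacturer in sorted_manufacturers
--     ))
--
--     # Add remaining machines to batches
--     for machine in all_remaining:
--         if len(current_batch) >= batch_size:
--             batches.append(current_batch)
--             current_batch = []
--         current_batch.append(machine)
--
--     # Add final partial batch if needed
--     if current_batch:
--         batches.append(current_batch)
--
--     return batches
-- ===== SOURCE B (Python) =====
-- from typing import List, Dict
--
--
-- def group_machines_by_manufacturer(machines: List[Dict]) -> Dict[str, List[Dict]]: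
--     grouped = {}
--     for machine in machines:
--         manufacturer = machine.get("Company", "Unknown")
--         if manufacturer not in grouped:
--             grouped[manufacturer] = []
--         grouped[manufacturer].append(machine)
--     return grouped
--
--
-- def _chunk(seq, size):
--     """Split seq into consecutive groups of `size` with a trailing partial group."""
--     return [seq[i:i + size] for i in range(0, len(seq), size)]
--
--
-- def create_optimized_batch(machines: List[Dict], batch_size: int = 5) -> List[List[Dict]]:
--     grouped = group_machines_by_manufacturer(machines)
--     order = sorted(grouped, key=lambda m: len(grouped[m]), reverse=True)
--     # one machine per manufacturer first (diversity), then everything left over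
--     firsts = [m for k in order for m in grouped[k][:1]]
--     rest = [m for k in order for m in grouped[k][1:]]
--     return _chunk(firsts, batch_size) + _chunk(rest, batch_size)
-- ===== Notes on version B (the rewrite author's own statement) =====
-- stated objective: simpler
-- what changed: Replaces A's stateful batching (a pop-from-front mutation of the grouped dict with interleaved current_batch/flush bookkeeping in two loops) by a pure decomposition: build the firsts list (one machine per manufacturer) and the rest list, and independently chunk each into batch_size slices with one comprehension-based chunk helper.
-- outside the precondition, e.g. on create_optimized_batch([{'Company': 'X'}], -1): A returns [[{'Company': 'X'}]], B returns []
import Mathlib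
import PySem

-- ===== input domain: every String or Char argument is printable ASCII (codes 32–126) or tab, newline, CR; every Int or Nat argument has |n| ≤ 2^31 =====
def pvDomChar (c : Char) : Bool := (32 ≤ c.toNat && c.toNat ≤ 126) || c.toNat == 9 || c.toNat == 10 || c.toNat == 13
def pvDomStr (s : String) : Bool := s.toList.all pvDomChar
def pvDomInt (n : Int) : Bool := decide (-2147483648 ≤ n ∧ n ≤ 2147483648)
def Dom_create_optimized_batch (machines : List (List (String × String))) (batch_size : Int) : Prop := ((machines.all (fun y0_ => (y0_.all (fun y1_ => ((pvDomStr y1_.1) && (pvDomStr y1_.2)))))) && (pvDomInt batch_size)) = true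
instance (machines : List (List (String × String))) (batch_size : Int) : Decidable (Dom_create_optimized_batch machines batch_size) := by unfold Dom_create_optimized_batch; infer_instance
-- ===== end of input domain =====

-- B replaces A's pop(0)-mutating, interleaved batch/flush loops by a pure decomposition: chunk the
-- per-manufacturer firsts and the remaining machines independently (objective: simpler).

-- ===== PORT A =====
-- shared module helper: group_machines_by_manufacturer (used by both Pythons)
def pvA_groupStep (grouped : PySem.Dict String (List (List (String × String)))) (machine : List (String × String)) : PySem.Dict String (List (List (String × String))) :=
  let manufacturer := PySem.Dict.getD (PySem.Dict.mk machine) "Company" "Unknown"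
  let grouped := if grouped.contains manufacturer then grouped else grouped.insert manufacturer []
  grouped.modify manufacturer [] (fun l => l ++ [machine])

def group_machines_by_manufacturer (machines : List (List (String × String))) : PySem.Dict String (List (List (String × String))) :=
  machines.foldl pvA_groupStep PySem.Dict.empty

-- 'if current_batch: batches.append(current_batch)'
def pvFlush (st : List (List (String × String)) × List (List (List (String × String)))) : List (List (List (String × String))) :=
  if st.1 ≠ [] then st.2 ++ [st.1] else st.2

-- first loop body: 'if grouped[m]: current_batch.append(grouped[m].pop(0)); if len(current_batch) >= batch_size: flush'
def pvA_step1 (batch_size : Int) (st : PySem.Dict String (List (List (String × String))) × List (List (String × String)) × List (List (List (String × String)))) (manufacturer : String) : PySem.Dict String (List (List (String × String))) × List (List (String × String)) × List (List (List (String × String))) :=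
  match st.1.getD manufacturer [] with
  | [] => st
  | x :: rest =>
    let grouped := st.1.insert manufacturer rest
    let current_batch := st.2.1 ++ [x]
    if batch_size ≤ (current_batch.length : Int) then (grouped, [], st.2.2 ++ [current_batch])
    else (grouped, current_batch, st.2.2)

-- second loop body: 'if len(current_batch) >= batch_size: flush; current_batch.append(machine)'
def pvA_step2 (batch_size : Int) (st : List (List (String × String)) × List (List (List (String × String)))) (machine : List (String × String)) : List (List (String × String)) × List (List (List (String × String))) :=
  let st := if batch_size ≤ (st.1.length : Int) then (([] : List (List (String × String))), st.2 ++ [st.1]) else st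
  (st.1 ++ [machine], st.2)

def create_optimized_batch (machines : List (List (String × String))) (batch_size : Int) : List (List (List (String × String))) :=
  let grouped := group_machines_by_manufacturer machines
  let sorted_manufacturers := PySem.List.sorted grouped.keys (fun m => PySem.List.len (grouped.getD m [])) true
  let st1 := sorted_manufacturers.foldl (pvA_step1 batch_size) (grouped, [], [])
  let batches := pvFlush st1.2
  let all_remaining := sorted_manufacturers.flatMap (fun m => st1.1.getD m [])
  let st2 := all_remaining.foldl (pvA_step2 batch_size) ([], batches)
  pvFlush st2

-- ===== PORT B =====
-- '[seq[i:i+size] for i in range(0, len(seq), size)]'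
def pv_chunk {α : Type} (seq : List α) (size : Int) : List (List α) :=
  (PySem.List.pyRange 0 (PySem.List.len seq) size).map
    (fun i => PySem.List.slice seq (some i) (some (i + size)))

def create_optimized_batch_alt (machines : List (List (String × String))) (batch_size : Int) : List (List (List (String × String))) :=
  let grouped := group_machines_by_manufacturer machines
  let order := PySem.List.sorted grouped.keys (fun m => PySem.List.len (grouped.getD m [])) true
  let firsts := order.flatMap (fun k => PySem.List.slice (grouped.getD k []) none (some 1))
  let rest := order.flatMap (fun k => PySem.List.slice (grouped.getD k []) (some 1) none)
  pv_chunk firsts batch_size ++ pv_chunk rest batch_size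

-- ===== PRECONDITION & SPEC =====
-- Pre_ restricts to the natural domain batch_size ≥ 1: for non-positive batch sizes (a nonsensical
-- request, outside the task's natural domain) A still returns degenerate batching (empty or mis-sized
-- batches) while B's range-based chunking raises ValueError at size zero and yields no batches for
-- negative sizes.
def Pre_create_optimized_batch (machines : List (List (String × String))) (batch_size : Int) : Prop := 1 ≤ batch_size
instance (machines : List (List (String × String))) (batch_size : Int) : Decidable (Pre_create_optimized_batch machines batch_size) := by unfold Pre_create_optimized_batch; infer_instance

def pvWitness_create_optimized_batch : (List (List (String × String))) × Int := ([[("Company", "X")], [("Company", "Y")]], 1)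

def Spec_create_optimized_batch (machines : List (List (String × String))) (batch_size : Int) (out : List (List (List (String × String)))) : Prop := out = create_optimized_batch_alt machines batch_size
instance (machines : List (List (String × String))) (batch_size : Int) (out : List (List (List (String × String)))) : Decidable (Spec_create_optimized_batch machines batch_size out) := by unfold Spec_create_optimized_batch; infer_instance

-- ===== CLAIM (what is proved, stated in full; the proofs are below) =====
def Claim_equal_create_optimized_batch : Prop := ∀ (machines : List (List (String × String))) (batch_size : Int), Dom_create_optimized_batch machines batch_size → Pre_create_optimized_batch machines batch_size → Spec_create_optimized_batch machines batch_size (create_optimized_batch machines batch_size)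

-- ===== LEMMAS AND PROOFS =====

-- the manufacturer key of a machine
def pvKey (machine : List (String × String)) : String :=
  PySem.Dict.getD (PySem.Dict.mk machine) "Company" "Unknown"

-- pure form of A's first-loop batch bookkeeping (append, then flush when full)
def pvFb (batch_size : Int) (st : List (List (String × String)) × List (List (List (String × String)))) (x : List (String × String)) : List (List (String × String)) × List (List (List (String × String))) :=
  let cur := st.1 ++ [x]
  if batch_size ≤ (cur.length : Int) then (([] : List (List (String × String))), st.2 ++ [cur]) else (cur, st.2)

-- mathematical chunking: consecutive groups of bs with a trailing partial group
def pvChunks {α : Type} (bs : Nat) : List α → List (List α)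
  | [] => []
  | x :: xs => (x :: xs).take (max bs 1) :: pvChunks bs ((x :: xs).drop (max bs 1))
  termination_by l => l.length
  decreasing_by simp

theorem pvChunks_cons' {α : Type} {bs : Nat} (h1 : 1 ≤ bs) {l : List α} (hne : l ≠ []) :
    pvChunks bs l = l.take bs :: pvChunks bs (l.drop bs) := by
  cases l with
  | nil => exact absurd rfl hne
  | cons x xs => rw [pvChunks.eq_2, Nat.max_eq_left h1]

theorem pvChunks_of_len_le {α : Type} {bs : Nat} (h1 : 1 ≤ bs) {l : List α} (hne : l ≠ [])
    (hle : l.length ≤ bs) : pvChunks bs l = [l] := by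
  rw [pvChunks_cons' h1 hne, List.take_of_length_le hle, List.drop_of_length_le hle, pvChunks.eq_1]

theorem pvChunks_append_full {α : Type} {bs : Nat} (h1 : 1 ≤ bs) {l : List α} (hl : l.length = bs)
    (ys : List α) : pvChunks bs (l ++ ys) = l :: pvChunks bs ys := by
  have hne : l ++ ys ≠ [] := by
    intro h; have := congrArg List.length h; simp [hl] at this; omega
  rw [pvChunks_cons' h1 hne, List.take_append_of_le_length (by omega), List.take_of_length_le (by omega),
      List.drop_append_of_le_length (by omega), List.drop_of_length_le (by omega)]
  simp

-- A's second loop (flush-then-append), flushed at the end, chunks cur ++ xs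
theorem pv_foldFa (bs : Int) (h1 : 1 ≤ bs) :
    ∀ (xs : List (List (String × String))) (cur : List (List (String × String))) (acc : List (List (List (String × String)))),
      (cur.length : Int) ≤ bs →
      pvFlush (xs.foldl (pvA_step2 bs) (cur, acc)) = acc ++ pvChunks bs.toNat (cur ++ xs) := by
  intro xs
  induction xs with
  | nil =>
    intro cur acc hle
    by_cases hc : cur = []
    · subst hc; simp [pvFlush, pvChunks.eq_1]
    · simp only [List.foldl_nil, List.append_nil, pvFlush, if_pos hc]
      rw [pvChunks_of_len_le (by omega) hc (by omega)]
  | cons x xs ih =>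
    intro cur acc hle
    simp only [List.foldl_cons]
    by_cases hb : bs ≤ (cur.length : Int)
    · have hcl : cur.length = bs.toNat := by omega
      have hst : pvA_step2 bs (cur, acc) x = ([x], acc ++ [cur]) := by
        simp [pvA_step2, hb]
      rw [hst, ih [x] (acc ++ [cur]) (by simp; omega)]
      rw [show cur ++ x :: xs = cur ++ ([x] ++ xs) by simp]
      rw [pvChunks_append_full (by omega) hcl]
      simp
    · have hst : pvA_step2 bs (cur, acc) x = (cur ++ [x], acc) := by
        simp [pvA_step2, hb]
      rw [hst, ih (cur ++ [x]) acc (by simp; omega)]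
      simp

-- A's first-loop bookkeeping (append-then-flush), flushed at the end, chunks cur ++ xs
theorem pv_foldFb (bs : Int) (h1 : 1 ≤ bs) :
    ∀ (xs : List (List (String × String))) (cur : List (List (String × String))) (acc : List (List (List (String × String)))),
      (cur.length : Int) < bs →
      pvFlush (xs.foldl (pvFb bs) (cur, acc)) = acc ++ pvChunks bs.toNat (cur ++ xs) := by
  intro xs
  induction xs with
  | nil =>
    intro cur acc hlt
    by_cases hc : cur = []
    · subst hc; simp [pvFlush, pvChunks.eq_1]
    · simp only [List.foldl_nil, List.append_nil, pvFlush, if_pos hc]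
      rw [pvChunks_of_len_le (by omega) hc (by omega)]
  | cons x xs ih =>
    intro cur acc hlt
    simp only [List.foldl_cons]
    by_cases hb : bs ≤ ((cur ++ [x]).length : Int)
    · have hcl : (cur ++ [x]).length = bs.toNat := by simp at hb ⊢; omega
      have hst : pvFb bs (cur, acc) x = ([], acc ++ [cur ++ [x]]) := by
        simp only [pvFb]; rw [if_pos hb]
      rw [hst, ih [] (acc ++ [cur ++ [x]]) (by simp; omega)]
      rw [show cur ++ x :: xs = (cur ++ [x]) ++ xs by simp]
      rw [pvChunks_append_full (by omega) hcl]
      simp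
    · have hst : pvFb bs (cur, acc) x = (cur ++ [x], acc) := by
        simp only [pvFb]; rw [if_neg hb]
      rw [hst, ih (cur ++ [x]) acc (by simp at hb ⊢; omega)]
      simp

-- range over a positive step: empty and cons forms
theorem pv_pyRange_pos_nil {a b s : Int} (hs : 0 < s) (h : b ≤ a) : PySem.List.pyRange a b s = [] := by
  rw [PySem.List.pyRange_of_pos a b hs, if_neg (by omega)]
  simp

theorem pv_pyRange_pos_cons {a b s : Int} (hs : 0 < s) (h : a < b) :
    PySem.List.pyRange a b s = a :: PySem.List.pyRange (a + s) b s := by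
  rw [PySem.List.pyRange_of_pos a b hs, PySem.List.pyRange_of_pos (a + s) b hs, if_pos h]
  by_cases h2 : a + s < b
  · rw [if_pos h2]
    have he : b - a + s - 1 = (b - (a + s) + s - 1) + 1 * s := by ring
    have hq : (b - a + s - 1) / s = (b - (a + s) + s - 1) / s + 1 := by
      rw [he, Int.add_mul_ediv_right _ _ (by omega)]
    have hnn : 0 ≤ (b - (a + s) + s - 1) / s := Int.ediv_nonneg (by omega) (by omega)
    rw [hq, Int.toNat_add hnn (by norm_num)]
    simp only [Int.toNat_one]
    rw [List.range_succ_eq_map, List.map_cons, List.map_map]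
    congr 1
    · simp
    · apply List.map_congr_left
      intro k _
      simp only [Function.comp_apply]
      push_cast
      ring
  · rw [if_neg h2]
    have hq : (b - a + s - 1) / s = 1 := by
      have h3 : b - a + s - 1 = (b - a - 1) + 1 * s := by ring
      rw [h3, Int.add_mul_ediv_right _ _ (by omega), Int.ediv_eq_zero_of_lt (by omega) (by omega)]
      norm_num
    rw [hq]
    simp

-- B's comprehension over range(0, len, size) chunks the suffix from a
theorem pv_chunk_aux {α : Type} {bs : Int} (h1 : 1 ≤ bs) (xs : List α) :
    ∀ (fuel : Nat) (a : Int), 0 ≤ a → xs.length ≤ a.toNat + fuel →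
      (PySem.List.pyRange a (xs.length : Int) bs).map (fun i => PySem.List.slice xs (some i) (some (i + bs)))
        = pvChunks bs.toNat (xs.drop a.toNat) := by
  intro fuel
  induction fuel with
  | zero =>
    intro a ha hle
    rw [pv_pyRange_pos_nil (by omega) (by omega), List.drop_of_length_le (by omega), pvChunks.eq_1]
    rfl
  | succ fuel ih =>
    intro a ha hle
    by_cases hab : a < (xs.length : Int)
    · rw [pv_pyRange_pos_cons (by omega) hab, List.map_cons, ih (a + bs) (by omega) (by omega)]
      rw [PySem.List.slice_toNat xs ha (by omega)]
      have h2 : (a + bs).toNat - a.toNat = bs.toNat := by omega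
      have h3 : xs.drop (a + bs).toNat = (xs.drop a.toNat).drop bs.toNat := by
        rw [List.drop_drop]; congr 1; omega
      have h4 : xs.drop a.toNat ≠ [] := by
        intro h; have := congrArg List.length h; simp at this; omega
      rw [h2, h3, pvChunks_cons' (by omega) h4]
    · rw [pv_pyRange_pos_nil (by omega) (by omega), List.drop_of_length_le (by omega), pvChunks.eq_1]
      rfl

-- B's comprehension-based chunk is pvChunks
theorem pv_chunk_eq {α : Type} (bs : Int) (h1 : 1 ≤ bs) (xs : List α) :
    pv_chunk xs bs = pvChunks bs.toNat xs := by
  have := pv_chunk_aux h1 xs xs.length 0 (by omega) (by simp)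
  simp only [Int.toNat_zero, List.drop_zero] at this
  simpa only [pv_chunk, PySem.List.len_eq] using this

-- the grouping step, written with pvKey
theorem pvA_groupStep_eq (d : PySem.Dict String (List (List (String × String)))) (x : List (String × String)) :
    pvA_groupStep d x = (if d.contains (pvKey x) then d else d.insert (pvKey x) []).modify (pvKey x) [] (fun l => l ++ [x]) := rfl

-- grouping characterization: the group of m is the sublist of machines keyed m
theorem pv_group_getD : ∀ (ms : List (List (String × String))) (d : PySem.Dict String (List (List (String × String)))) (m : String),
    (ms.foldl pvA_groupStep d).getD m [] = d.getD m [] ++ ms.filter (fun x => pvKey x == m) := by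
  intro ms
  induction ms with
  | nil => intro d m; simp
  | cons x tl ih =>
    intro d m
    have hstep : ∀ j, (pvA_groupStep d x).getD j [] = if j = pvKey x then d.getD (pvKey x) [] ++ [x] else d.getD j [] := by
      intro j
      rw [pvA_groupStep_eq]
      by_cases hc : d.contains (pvKey x) = true
      · simp only [hc, if_true]
        rw [PySem.Dict.getD_modify]
      · have hcf : d.contains (pvKey x) = false := by simpa using hc
        simp only [hcf, Bool.false_eq_true, if_false]
        rw [PySem.Dict.getD_modify, PySem.Dict.getD_insert, PySem.Dict.getD_insert,
            PySem.Dict.getD_of_not_contains d _ hcf]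
        by_cases hj : j = pvKey x <;> simp [hj]
    rw [List.foldl_cons, ih, hstep m, List.filter_cons]
    by_cases hm : m = pvKey x
    · have hb : (pvKey x == m) = true := by simp [hm]
      simp only [if_true, hm]
      simp
    · have hb : (pvKey x == m) = false := by simp; exact fun h => hm h.symm
      simp only [hb, Bool.false_eq_true, if_false, if_neg hm]

theorem pv_group_keys : ∀ (ms : List (List (String × String))) (d : PySem.Dict String (List (List (String × String)))),
    (ms.foldl pvA_groupStep d).keys = PySem.Set.update d.keys (ms.map pvKey) := by
  intro ms
  induction ms with
  | nil => intro d; rfl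
  | cons x tl ih =>
    intro d
    rw [List.foldl_cons, List.map_cons, PySem.Set.update_cons, ih]
    congr 1
    rw [pvA_groupStep_eq]
    by_cases hc : d.contains (pvKey x) = true
    · have hmem : pvKey x ∈ d.keys := by
        rw [PySem.Dict.contains_eq_decide_mem_keys] at hc; simpa using hc
      simp only [hc, if_true]
      rw [PySem.Dict.keys_modify, PySem.Dict.keys_insert_of_contains _ _ hc,
          PySem.Set.add_eq_ite, if_pos hmem]
    · have hcf : d.contains (pvKey x) = false := by simpa using hc
      have hmem : pvKey x ∉ d.keys := by
        rw [PySem.Dict.contains_eq_decide_mem_keys] at hcf; simpa using hcf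
      simp only [hcf, Bool.false_eq_true, if_false]
      rw [PySem.Dict.keys_modify,
          PySem.Dict.keys_insert_of_contains _ _ (PySem.Dict.contains_insert_self _ _ _),
          PySem.Dict.keys_insert_of_not_contains d _ hcf,
          PySem.Set.add_eq_ite, if_neg hmem]

-- A's first loop: the dict keeps the tails, the batches are pvFb folded over the heads
theorem pv_phase1 (bs : Int) :
    ∀ (ms : List String) (d : PySem.Dict String (List (List (String × String))))
      (cur : List (List (String × String))) (acc : List (List (List (String × String)))),
      ms.Nodup → (∀ m ∈ ms, d.getD m [] ≠ []) →
      (∀ j, (ms.foldl (pvA_step1 bs) (d, cur, acc)).1.getD j [] = if j ∈ ms then (d.getD j []).tail else d.getD j [])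
      ∧ (ms.foldl (pvA_step1 bs) (d, cur, acc)).2 = (ms.map (fun m => (d.getD m []).headI)).foldl (pvFb bs) (cur, acc) := by
  intro ms
  induction ms with
  | nil =>
    intro d cur acc _ _
    exact ⟨fun j => by simp, by simp⟩
  | cons m tl ih =>
    intro d cur acc hnd hne
    have hm : d.getD m [] ≠ [] := hne m List.mem_cons_self
    have hmem : m ∉ tl := (List.nodup_cons.mp hnd).1
    have hndtl : tl.Nodup := (List.nodup_cons.mp hnd).2
    cases hg : d.getD m [] with
    | nil => exact absurd hg hm
    | cons x rest =>
      have hstep : pvA_step1 bs (d, cur, acc) m = (d.insert m rest, pvFb bs (cur, acc) x) := by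
        simp only [pvA_step1, pvFb, hg]
        split_ifs <;> rfl
      have hne' : ∀ m' ∈ tl, (d.insert m rest).getD m' [] ≠ [] := by
        intro m' hm'
        rw [PySem.Dict.getD_insert_of_ne _ _ _ (by rintro rfl; exact hmem hm')]
        exact hne m' (List.mem_cons_of_mem _ hm')
      obtain ⟨ih1, ih2⟩ := ih (d.insert m rest) (pvFb bs (cur, acc) x).1 (pvFb bs (cur, acc) x).2 hndtl hne'
      constructor
      · intro j
        rw [List.foldl_cons, hstep,
            show (d.insert m rest, pvFb bs (cur, acc) x) = (d.insert m rest, (pvFb bs (cur, acc) x).1, (pvFb bs (cur, acc) x).2) from rfl,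
            ih1 j]
        by_cases hj : j ∈ tl
        · rw [if_pos hj, if_pos (List.mem_cons_of_mem _ hj),
              PySem.Dict.getD_insert_of_ne _ _ _ (by rintro rfl; exact hmem hj)]
        · rw [if_neg hj]
          by_cases hjm : j = m
          · subst hjm
            rw [PySem.Dict.getD_insert, if_pos rfl, if_pos List.mem_cons_self, hg]
            rfl
          · rw [PySem.Dict.getD_insert_of_ne _ _ _ hjm, if_neg (by simp [hjm, hj])]
      · rw [List.foldl_cons, hstep,
            show (d.insert m rest, pvFb bs (cur, acc) x) = (d.insert m rest, (pvFb bs (cur, acc) x).1, (pvFb bs (cur, acc) x).2) from rfl,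
            ih2, List.map_cons, List.foldl_cons, hg]
        congr 1
        apply List.map_congr_left
        intro m' hm'
        rw [PySem.Dict.getD_insert_of_ne _ _ _ (by rintro rfl; exact hmem hm')]

theorem pv_flatMap_congr {α β : Type} {l : List α} {f g : α → List β} (h : ∀ a ∈ l, f a = g a) :
    l.flatMap f = l.flatMap g := by
  induction l with
  | nil => rfl
  | cons x xs ih => simp only [List.flatMap_cons, h x (by simp), ih (fun a ha => h a (by simp [ha]))]

theorem pv_flatMap_singleton_map {α β : Type} (l : List α) (f : α → β) :
    l.flatMap (fun x => [f x]) = l.map f := by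
  induction l with
  | nil => rfl
  | cons x xs ih => simp [ih]

-- ===== VERDICT (by name: the statement is the Claim_ definition above) =====
theorem create_optimized_batch_spec : Claim_equal_create_optimized_batch := by
  intro machines bs _hdom hpre
  have hpre' : (1 : Int) ≤ bs := hpre
  unfold Spec_create_optimized_batch
  simp only [create_optimized_batch, create_optimized_batch_alt]
  set d := group_machines_by_manufacturer machines with hd
  set order := PySem.List.sorted d.keys (fun m => PySem.List.len (d.getD m [])) true with horder
  have hkeys : d.keys = PySem.Set.ofList (machines.map pvKey) := by
    rw [hd, group_machines_by_manufacturer, pv_group_keys, PySem.Dict.keys_empty,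
        PySem.Set.update_nil_left]
  have hknd : d.keys.Nodup := by rw [hkeys]; exact PySem.Set.nodup_ofList _
  have hond : order.Nodup := ((PySem.List.sorted_perm _ _ _).nodup_iff).mpr hknd
  have hne : ∀ m ∈ order, d.getD m [] ≠ [] := by
    intro m hmem
    have hk : m ∈ d.keys := (PySem.List.mem_sorted _ _ _ m).mp hmem
    rw [hkeys, PySem.Set.mem_ofList] at hk
    obtain ⟨x, hx, hkx⟩ := List.mem_map.mp hk
    rw [hd, group_machines_by_manufacturer, pv_group_getD, PySem.Dict.getD_empty, List.nil_append]
    intro hflt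
    have hxmem : x ∈ machines.filter (fun y => pvKey y == m) :=
      List.mem_filter.mpr ⟨hx, by simp [hkx]⟩
    rw [hflt] at hxmem
    exact absurd hxmem (List.not_mem_nil)
  obtain ⟨h1, h2⟩ := pv_phase1 bs order d [] [] hond hne
  rw [h2, pv_foldFb bs hpre' _ [] [] (by simp; omega), List.nil_append]
  have hrem : order.flatMap (fun m => (order.foldl (pvA_step1 bs) (d, [], [])).1.getD m []) =
      order.flatMap (fun m => (d.getD m []).tail) :=
    pv_flatMap_congr (fun m hm => by rw [h1 m, if_pos hm])
  rw [hrem, pv_foldFa bs hpre' _ [] _ (by simp; omega), List.nil_append]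
  rw [pv_chunk_eq bs hpre', pv_chunk_eq bs hpre']
  congr 1
  · congr 1
    rw [← pv_flatMap_singleton_map]
    apply pv_flatMap_congr
    intro m hm
    cases hg : d.getD m [] with
    | nil => exact absurd hg (hne m hm)
    | cons x rest =>
      rw [PySem.List.slice_to _ (by norm_num)]
      simp
  · congr 1
    apply pv_flatMap_congr
    intro m _
    rw [PySem.List.slice_from_one]
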